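-- pv_equiv track=rewrite | github.com/telador/practice | hangman.py | match_with_gaps
-- ===== SOURCE A (Python) =====
-- def match_with_gaps(my_word, other_word):
--     '''
--     my_word: string with _ characters, current guess of secret word
--     other_word: string, regular English word
--     returns: boolean, True if all the actual letters of my_word match the
--         corresponding letters of other_word, or the letter is the special symbol
--         _ , and my_word and other_word are of the same length;
--         False otherwise:
--     '''
--     checker = True
--     if len(my_word)!=len(other_word):
--       checker = False
--     else:
--       for i in range(len(my_word)):
--         if my_word[i]=='_':
--           pass
--         elif my_word[i]==other_word[i] and my_word.count(my_word[i])==other_word.count(my_word[i]):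
--           pass
--         else:
--           checker = False
--     return checker
-- ===== SOURCE B (Python) =====
-- def match_with_gaps(my_word, other_word):
--     if len(my_word) != len(other_word):
--         return False
--     if not all(m == '_' or m == o for m, o in zip(my_word, other_word)):
--         return False
--     return all(my_word.count(c) == other_word.count(c) for c in set(my_word) - {'_'})
-- ===== Notes on version B (the rewrite author's own statement) =====
-- stated objective: faster
-- what changed: A's single index loop fuses the positional test with a count test re-run at every position (O(n) counting per index); B does a length guard, one all() pass over zipped position pairs, then a count-agreement all() over only the distinct non-underscore letters of my_word, with early returns.
import Mathlib
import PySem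

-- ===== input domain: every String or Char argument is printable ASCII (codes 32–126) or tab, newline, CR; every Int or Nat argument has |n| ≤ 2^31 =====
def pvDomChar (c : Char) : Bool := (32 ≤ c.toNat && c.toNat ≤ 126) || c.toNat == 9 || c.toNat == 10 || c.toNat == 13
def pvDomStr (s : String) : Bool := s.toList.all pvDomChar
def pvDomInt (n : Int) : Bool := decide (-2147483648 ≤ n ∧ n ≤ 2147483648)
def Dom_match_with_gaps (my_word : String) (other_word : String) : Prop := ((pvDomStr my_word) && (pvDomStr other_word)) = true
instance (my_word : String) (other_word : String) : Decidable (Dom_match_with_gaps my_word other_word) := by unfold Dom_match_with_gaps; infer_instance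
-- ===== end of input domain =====

-- B replaces A's single index loop (positional test and count test fused per position) by two
-- differently-shaped passes: a zip over aligned positions, then a count check over the distinct
-- non-underscore letters of my_word, so counting runs once per distinct letter instead of once per position (objective: faster; measured).

-- ===== PORT A =====
-- literal port of A: checker flag, loop over range(len(my_word));
-- my_word.count(my_word[i]) has a single-character needle, ported as List.count of that char (exact for length-1 substrings)
def match_with_gaps (my_word : String) (other_word : String) : Bool :=
  if PySem.Str.len my_word ≠ PySem.Str.len other_word then
    false
  else
    (PySem.List.pyRange 0 (PySem.Str.len my_word) 1).foldl
      (fun checker i =>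
        if PySem.List.pyGetD my_word.toList i ' ' = '_' then checker
        else if PySem.List.pyGetD my_word.toList i ' ' = PySem.List.pyGetD other_word.toList i ' ' ∧
                my_word.toList.count (PySem.List.pyGetD my_word.toList i ' ') =
                other_word.toList.count (PySem.List.pyGetD my_word.toList i ' ') then checker
        else false) true

-- ===== PORT B =====
-- port of Source B: length guard, zip pass, then count agreement over set(my_word) - {'_'}
-- (set difference ported as a filter on the PySem.Set; count again single-character, List.count)
def match_with_gaps_alt (my_word : String) (other_word : String) : Bool :=
  if PySem.Str.len my_word ≠ PySem.Str.len other_word then false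
  else if ¬ ((my_word.toList.zip other_word.toList).all (fun p => p.1 == '_' || p.1 == p.2)) then false
  else ((PySem.Set.ofList my_word.toList).filter (fun c => c ≠ '_')).all
        (fun c => my_word.toList.count c == other_word.toList.count c)

-- ===== PRECONDITION & SPEC =====
def Spec_match_with_gaps (my_word : String) (other_word : String) (out : Bool) : Prop := out = match_with_gaps_alt my_word other_word
instance (my_word : String) (other_word : String) (out : Bool) : Decidable (Spec_match_with_gaps my_word other_word out) := by unfold Spec_match_with_gaps; infer_instance

-- ===== CLAIM (what is proved, stated in full; the proofs are below) =====
def Claim_equal_match_with_gaps : Prop := ∀ (my_word : String) (other_word : String), Dom_match_with_gaps my_word other_word → Spec_match_with_gaps my_word other_word (match_with_gaps my_word other_word)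


-- ===== LEMMAS AND PROOFS =====

-- A's loop shape: the accumulator only ever stays or drops to false
lemma foldl_keep_or_false {α : Type} (l : List α) (P Q : α → Prop)
    [DecidablePred P] [DecidablePred Q] (init : Bool) :
    l.foldl (fun b x => if P x then b else if Q x then b else false) init
      = (init && l.all (fun x => decide (P x) || decide (Q x))) := by
  induction l generalizing init with
  | nil => simp
  | cons a t ih =>
    simp only [List.foldl_cons, List.all_cons, ih]
    by_cases hP : P a <;> by_cases hQ : Q a <;> simp [hP, hQ]

-- the per-index pass of A equals B's zip pass plus B's per-letter count pass
lemma range_all_eq_zip_and_counts (m o : List Char) (h : m.length = o.length) :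
    ((PySem.List.pyRange 0 (m.length : Int) 1).all fun i =>
       decide (PySem.List.pyGetD m i ' ' = '_') ||
       decide (PySem.List.pyGetD m i ' ' = PySem.List.pyGetD o i ' ' ∧
               m.count (PySem.List.pyGetD m i ' ') = o.count (PySem.List.pyGetD m i ' ')))
    = ((m.zip o).all (fun p => p.1 == '_' || p.1 == p.2) &&
       ((PySem.Set.ofList m).filter (fun c => c ≠ '_')).all (fun c => m.count c == o.count c)) := by
  rw [Bool.eq_iff_iff]
  simp only [List.all_eq_true, Bool.and_eq_true, Bool.or_eq_true, decide_eq_true_eq,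
    beq_iff_eq, PySem.List.mem_pyRange_one, List.mem_filter, PySem.Set.mem_ofList]
  constructor
  · intro hall
    constructor
    · rintro ⟨x, y⟩ hp
      obtain ⟨k, hk, hget⟩ := List.mem_iff_getElem.mp hp
      have hkm : k < m.length := lt_of_lt_of_le hk (by simp [List.length_zip])
      have hko : k < o.length := h ▸ hkm
      have hx : x = m[k] := by
        have := hget; simp [List.getElem_zip] at this; exact this.1.symm
      have hy : y = o[k] := by
        have := hget; simp [List.getElem_zip] at this; exact this.2.symm
      have := hall (k : Int) ⟨Int.natCast_nonneg k, by exact_mod_cast hkm⟩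
      simp only [PySem.List.pyGetD_natCast, List.getD_eq_getElem _ _ hkm,
        List.getD_eq_getElem _ _ hko] at this
      rcases this with h1 | h2
      · exact Or.inl (hx ▸ h1)
      · exact Or.inr (by rw [hx, hy]; exact h2.1)
    · intro c hc
      obtain ⟨k, hkm, hget⟩ := List.mem_iff_getElem.mp hc.1
      have hko : k < o.length := h ▸ hkm
      have := hall (k : Int) ⟨Int.natCast_nonneg k, by exact_mod_cast hkm⟩
      simp only [PySem.List.pyGetD_natCast, List.getD_eq_getElem _ _ hkm,
        List.getD_eq_getElem _ _ hko] at this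
      rw [hget] at this
      rcases this with h1 | h2
      · exact absurd h1 (by simpa using hc.2)
      · exact h2.2
  · rintro ⟨hpos, hcnt⟩ i ⟨hi0, hin⟩
    set k := i.toNat with hkdef
    have hik : i = (k : Int) := (Int.toNat_of_nonneg hi0).symm
    have hkm : k < m.length := by omega
    have hko : k < o.length := h ▸ hkm
    rw [hik]
    simp only [PySem.List.pyGetD_natCast, List.getD_eq_getElem _ _ hkm,
      List.getD_eq_getElem _ _ hko]
    by_cases hu : m[k] = '_'
    · exact Or.inl hu
    · refine Or.inr ⟨?_, ?_⟩
      · have hmem : (m[k], o[k]) ∈ m.zip o := by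
          have hkz : k < (m.zip o).length := by simp [List.length_zip]; omega
          have : (m.zip o)[k] = (m[k], o[k]) := List.getElem_zip
          exact this ▸ List.getElem_mem hkz
        rcases hpos _ hmem with h1 | h1
        · exact absurd h1 hu
        · exact h1
      · exact hcnt m[k] ⟨List.getElem_mem hkm, by simpa using hu⟩

theorem match_with_gaps_spec : Claim_equal_match_with_gaps := by
  intro my other _
  unfold Spec_match_with_gaps match_with_gaps match_with_gaps_alt
  by_cases h : my.toList.length = other.toList.length
  · have hlen : ¬ (PySem.Str.len my ≠ PySem.Str.len other) := by
      simp [PySem.Str.len_eq, h]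
    rw [if_neg hlen, if_neg hlen, foldl_keep_or_false]
    have hstr : PySem.Str.len my = (my.toList.length : Int) := by simp [PySem.Str.len_eq]
    rw [hstr, Bool.true_and, range_all_eq_zip_and_counts my.toList other.toList h]
    by_cases hz : (my.toList.zip other.toList).all (fun p => p.1 == '_' || p.1 == p.2) = true
    · simp [hz]
    · simp [hz]
  · have hlen : PySem.Str.len my ≠ PySem.Str.len other := by
      simp [PySem.Str.len_eq]; exact_mod_cast h
    rw [if_pos hlen, if_pos hlen]
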